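-- pv_equiv track=rewrite | github.com/MilanTrz/semantopia | word2vec-service/app.py | same_article_group
-- ===== SOURCE A (Python) =====
-- ARTICLE_GROUPS = [
--     {'le', 'la', 'les', "l"},
--     {'un', 'une'},
--     {'de', 'du', 'des', "d"},
--     {'au', 'aux'},
--     {'ce', 'ces'},
--     {'cet', 'cette'}
-- ]
--
-- def same_article_group(w1: str, w2: str) -> bool:
--     nw1 = w1.lower().strip()
--     nw2 = w2.lower().strip()
--     if not nw1 or not nw2:
--         return False
--     for group in ARTICLE_GROUPS:
--         if nw1 in group and nw2 in group:
--             return True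
--     return False
-- ===== SOURCE B (Python) =====
-- ARTICLE_GROUPS = [
--     {'le', 'la', 'les', "l"},
--     {'un', 'une'},
--     {'de', 'du', 'des', "d"},
--     {'au', 'aux'},
--     {'ce', 'ces'},
--     {'cet', 'cette'}
-- ]
--
-- # Precomputed index: article word -> its group id (all words are distinct across groups).
-- _WORD_TO_GROUP = {w: i for i, group in enumerate(ARTICLE_GROUPS) for w in group}
--
-- def same_article_group(w1: str, w2: str) -> bool:
--     nw1 = w1.lower().strip()
--     nw2 = w2.lower().strip()
--     if not nw1 or not nw2:
--         return False
--     g1 = _WORD_TO_GROUP.get(nw1)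
--     return g1 is not None and _WORD_TO_GROUP.get(nw2) == g1
-- ===== Notes on version B (the rewrite author's own statement) =====
-- stated objective: idiomatic
-- what changed: Replaces the per-call scan over the six article groups with a module-level precomputed word-to-group-id dict, so the function becomes two O(1) lookups and an equality check.
import Mathlib
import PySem

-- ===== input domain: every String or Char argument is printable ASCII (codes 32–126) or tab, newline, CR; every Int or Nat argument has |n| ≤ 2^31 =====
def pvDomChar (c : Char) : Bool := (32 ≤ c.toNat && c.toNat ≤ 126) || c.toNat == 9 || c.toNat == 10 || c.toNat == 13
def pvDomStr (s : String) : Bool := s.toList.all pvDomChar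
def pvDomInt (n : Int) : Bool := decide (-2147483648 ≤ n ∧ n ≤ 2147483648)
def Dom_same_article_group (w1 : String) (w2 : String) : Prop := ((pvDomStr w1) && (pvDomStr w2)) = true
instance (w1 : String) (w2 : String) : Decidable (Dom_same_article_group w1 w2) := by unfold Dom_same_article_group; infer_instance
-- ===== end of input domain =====

-- B replaces A's per-call scan over the article groups by a precomputed word → group-id dictionary (idiomatic).

-- ===== PORT A =====
def ARTICLE_GROUPS : List (PySem.Set String) :=
  [PySem.Set.ofList ["le", "la", "les", "l"],
   PySem.Set.ofList ["un", "une"],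
   PySem.Set.ofList ["de", "du", "des", "d"],
   PySem.Set.ofList ["au", "aux"],
   PySem.Set.ofList ["ce", "ces"],
   PySem.Set.ofList ["cet", "cette"]]

-- the 'for group in ARTICLE_GROUPS: if …: return True' loop, with early return
def agLoop : List (PySem.Set String) → String → String → Bool
  | [], _, _ => false
  | g :: rest, a, b =>
      if PySem.Set.contains g a && PySem.Set.contains g b then true else agLoop rest a b

def same_article_group (w1 : String) (w2 : String) : Bool :=
  let nw1 := PySem.Str.strip (PySem.Str.lower w1)
  let nw2 := PySem.Str.strip (PySem.Str.lower w2)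
  if nw1 == "" || nw2 == "" then false
  else agLoop ARTICLE_GROUPS nw1 nw2

-- ===== PORT B =====
-- {w: i for i, group in enumerate(ARTICLE_GROUPS) for w in group}; within-group insertion
-- order follows Set.ofList order (lookup-only use, so hash order is immaterial)
def word2group : PySem.Dict String Int :=
  (PySem.List.enumerate ARTICLE_GROUPS 0).foldl
    (fun d p => p.2.foldl (fun d w => d.insert w p.1) d) PySem.Dict.empty

def same_article_group_alt (w1 : String) (w2 : String) : Bool :=
  let nw1 := PySem.Str.strip (PySem.Str.lower w1)
  let nw2 := PySem.Str.strip (PySem.Str.lower w2)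
  if nw1 == "" || nw2 == "" then false
  else (word2group.get? nw1).isSome && (word2group.get? nw2 == word2group.get? nw1)

-- ===== PRECONDITION & SPEC =====
def Spec_same_article_group (w1 : String) (w2 : String) (out : Bool) : Prop := out = same_article_group_alt w1 w2
instance (w1 : String) (w2 : String) (out : Bool) : Decidable (Spec_same_article_group w1 w2 out) := by unfold Spec_same_article_group; infer_instance

-- ===== CLAIM (what is proved, stated in full; the proofs are below) =====
def Claim_equal_same_article_group : Prop := ∀ (w1 : String) (w2 : String), Dom_same_article_group w1 w2 → Spec_same_article_group w1 w2 (same_article_group w1 w2)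

-- ===== LEMMAS AND PROOFS =====

def allWords : List String :=
  ["le", "la", "les", "l", "un", "une", "de", "du", "des", "d", "au", "aux", "ce", "ces", "cet", "cette"]

lemma get?_of_not_mem (x : String) (hx : x ∉ allWords) : word2group.get? x = none := by
  simp only [allWords, List.mem_cons, not_or] at hx
  obtain ⟨h1,h2,h3,h4,h5,h6,h7,h8,h9,h10,h11,h12,h13,h14,h15,h16,-⟩ := hx
  show (PySem.Dict.mk _).get? x = none
  simp [PySem.Dict.get?, PySem.Set.ofList, PySem.Set.add, PySem.Dict.insert, PySem.Dict.empty,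
    Ne.symm h1, Ne.symm h2, Ne.symm h3, Ne.symm h4, Ne.symm h5, Ne.symm h6, Ne.symm h7,
    Ne.symm h8, Ne.symm h9, Ne.symm h10, Ne.symm h11, Ne.symm h12, Ne.symm h13, Ne.symm h14,
    Ne.symm h15, Ne.symm h16]

lemma agLoop_of_not_mem_right (a x : String) (hx : x ∉ allWords) :
    agLoop ARTICLE_GROUPS a x = false := by
  simp only [allWords, List.mem_cons, not_or] at hx
  obtain ⟨h1,h2,h3,h4,h5,h6,h7,h8,h9,h10,h11,h12,h13,h14,h15,h16,-⟩ := hx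
  simp [agLoop, ARTICLE_GROUPS, PySem.Set.contains, PySem.Set.ofList, PySem.Set.add,
    h1, h2, h3, h4, h5, h6, h7, h8, h9, h10, h11, h12, h13, h14, h15, h16]

lemma core_mem : ∀ a ∈ allWords, ∀ b ∈ allWords,
    agLoop ARTICLE_GROUPS a b =
      ((word2group.get? a).isSome && (word2group.get? b == word2group.get? a)) := by
  decide

lemma core (a b : String) :
    agLoop ARTICLE_GROUPS a b =
      ((word2group.get? a).isSome && (word2group.get? b == word2group.get? a)) := by
  by_cases ha : a ∈ allWords
  · by_cases hb : b ∈ allWords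
    · exact core_mem a ha b hb
    · rw [agLoop_of_not_mem_right a b hb, get?_of_not_mem b hb]
      cases hga : word2group.get? a <;> rfl
  · have hga := get?_of_not_mem a ha
    have hfa : agLoop ARTICLE_GROUPS a b = false := by
      simp only [allWords, List.mem_cons, not_or] at ha
      obtain ⟨h1,h2,h3,h4,h5,h6,h7,h8,h9,h10,h11,h12,h13,h14,h15,h16,-⟩ := ha
      simp [agLoop, ARTICLE_GROUPS, PySem.Set.contains, PySem.Set.ofList, PySem.Set.add,
        h1, h2, h3, h4, h5, h6, h7, h8, h9, h10, h11, h12, h13, h14, h15, h16]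
    rw [hfa, hga]
    rfl

-- ===== VERDICT (by name: the statement is the Claim_ definition above) =====
theorem same_article_group_spec : Claim_equal_same_article_group := by
  intro w1 w2 _
  unfold Spec_same_article_group same_article_group same_article_group_alt
  dsimp only
  split
  · rfl
  · exact core _ _
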